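-- pv_equiv track=rewrite | github.com/gregipoux/Ro-Efrei-Project | cyclique.py | reconstruire_cycle
-- ===== SOURCE A (Python) =====
-- from typing import List, Tuple, Dict, Optional
--
-- def reconstruire_cycle(u: Tuple[int,int], v: Tuple[int,int], parent: Dict[Tuple[int,int], Optional[Tuple[int,int]]]) -> List[Tuple[int,int]]:
--     # Alors là, cette fonction reconstruit un cycle simple passant par l'arête (u,v) en remontant les chemins vers le LCA
--     # En clair, on remonte les chemins de u et v vers la racine, on trouve leur ancêtre commun (LCA), et on construit le cycle
--
--     # Construire le chemin de u vers la racine (on remonte en suivant les parents)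
--     chemin_u = []
--     x: Optional[Tuple[int,int]] = u
--     while x is not None:
--         chemin_u.append(x)
--         x = parent.get(x)
--
--     # Construire le chemin de v vers la racine (on remonte en suivant les parents aussi)
--     chemin_v = []
--     y: Optional[Tuple[int,int]] = v
--     while y is not None:
--         chemin_v.append(y)
--         y = parent.get(y)
--
--     # Trouver le LCA (Lowest Common Ancestor, l'ancêtre commun le plus proche)
--     set_v = set(chemin_v)
--     lca: Optional[Tuple[int,int]] = None
--     for node in chemin_u:
--         if node in set_v:
--             lca = node
--             break
--
--     if lca is None:
--         # Si pas de LCA trouvé, le cycle est u -> v directement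
--         return [u, v]
--
--     # Construire le cycle: u -> LCA -> v -> u (cycle = on fait le tour complet)
--     cycle = []
--     x = u
--     while x != lca:
--         cycle.append(x)
--         x = parent.get(x)
--         if x is None:
--             break
--     cycle.append(lca)
--
--     temp = []
--     y = v
--     while y != lca:
--         temp.append(y)
--         y = parent.get(y)
--         if y is None:
--             break
--     temp.reverse()
--     cycle.extend(temp)
--
--     return cycle
-- ===== SOURCE B (Python) =====
-- from typing import List, Tuple, Dict, Optional
--
-- def reconstruire_cycle(u: Tuple[int,int], v: Tuple[int,int], parent: Dict[Tuple[int,int], Optional[Tuple[int,int]]]) -> List[Tuple[int,int]]: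
--     # One upward walk from u, indexing each node; then one walk from v that stops
--     # at the first node already indexed (the LCA): the cycle is the indexed
--     # u-prefix up to the LCA plus the reversed v-prefix.
--     chemin_u = []
--     pos = {}
--     x: Optional[Tuple[int,int]] = u
--     while x is not None:
--         pos[x] = len(chemin_u)
--         chemin_u.append(x)
--         x = parent.get(x)
--     coll = []
--     y: Optional[Tuple[int,int]] = v
--     while y is not None and y not in pos:
--         coll.append(y)
--         y = parent.get(y)
--     if y is None:
--         # no common ancestor: the cycle is u -> v directly
--         return [u, v]
--     i = pos[y]
--     return chemin_u[:i+1] + coll[::-1]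
-- ===== Notes on version B (the rewrite author's own statement) =====
-- stated objective: simpler
-- what changed: A walks the parent chain four times (full u-chain, full v-chain, a set of the v-chain scanned against the u-chain for the LCA, then two re-walks to rebuild both cycle halves); B walks the u-chain once while recording each node's index in a dict, then walks from v once, stopping at the first indexed node, and assembles the cycle as a slice of the indexed u-path plus the reversed collected v-prefix.
import Mathlib
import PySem

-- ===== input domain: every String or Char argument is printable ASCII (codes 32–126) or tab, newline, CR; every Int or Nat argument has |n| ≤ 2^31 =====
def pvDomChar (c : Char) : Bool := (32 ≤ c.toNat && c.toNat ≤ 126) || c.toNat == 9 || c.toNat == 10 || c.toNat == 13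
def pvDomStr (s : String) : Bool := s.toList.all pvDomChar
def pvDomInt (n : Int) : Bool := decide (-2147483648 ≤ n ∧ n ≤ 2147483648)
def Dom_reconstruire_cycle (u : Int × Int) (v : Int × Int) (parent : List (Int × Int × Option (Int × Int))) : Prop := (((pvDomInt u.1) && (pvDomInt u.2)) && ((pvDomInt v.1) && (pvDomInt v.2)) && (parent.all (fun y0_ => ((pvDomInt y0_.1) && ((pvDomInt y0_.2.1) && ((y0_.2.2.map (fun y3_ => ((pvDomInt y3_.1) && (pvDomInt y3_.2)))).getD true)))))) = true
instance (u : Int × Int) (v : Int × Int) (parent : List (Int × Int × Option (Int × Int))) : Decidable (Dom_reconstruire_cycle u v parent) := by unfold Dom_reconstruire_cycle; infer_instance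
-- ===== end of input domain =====

-- B replaces A's three extra chain walks (full v-chain + set + two cycle re-walks) by one indexed u-walk,
-- one v-walk stopping at the first indexed node, and a slice (objective: simpler).

-- parent.get(x): first matching key in the association list, returning the stored Option (None for a missing key)
def pvGet (parent : List (Int × Int × Option (Int × Int))) (x : Int × Int) : Option (Int × Int) :=
  (parent.find? (fun e => e.1 == x.1 && e.2.1 == x.2)).bind (fun e => e.2.2)

-- ===== PORT A =====
-- 'while x is not None: chemin.append(x); x = parent.get(x)' (fuel ≥ chain length under Pre_)
def pvClimb (parent : List (Int × Int × Option (Int × Int))) : Nat → (Int × Int) → List (Int × Int)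
  | 0, x => [x]
  | n+1, x => x :: (match pvGet parent x with
      | none => []
      | some p => pvClimb parent n p)

-- 'cycle = []; while x != lca: cycle.append(x); x = parent.get(x); if x is None: break; cycle.append(lca)'
def pvCycleU (parent : List (Int × Int × Option (Int × Int))) : Nat → (Int × Int) → (Int × Int) → List (Int × Int)
  | 0, _, l => [l]
  | n+1, x, l => if x = l then [l] else
      x :: (match pvGet parent x with
        | none => [l]
        | some p => pvCycleU parent n p l)

-- 'temp = []; while y != lca: temp.append(y); y = parent.get(y); if y is None: break'
def pvTempV (parent : List (Int × Int × Option (Int × Int))) : Nat → (Int × Int) → (Int × Int) → List (Int × Int)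
  | 0, _, _ => []
  | n+1, y, l => if y = l then [] else
      y :: (match pvGet parent y with
        | none => []
        | some p => pvTempV parent n p l)

def reconstruire_cycle (u : Int × Int) (v : Int × Int) (parent : List (Int × Int × Option (Int × Int))) : List (Int × Int) :=
  let fuel := parent.length + 1
  let chemin_u := pvClimb parent fuel u
  let chemin_v := pvClimb parent fuel v
  let set_v : PySem.Set (Int × Int) := PySem.Set.ofList chemin_v
  -- 'for node in chemin_u: if node in set_v: lca = node; break'
  match chemin_u.find? (fun node => PySem.Set.contains set_v node) with
  | none => [u, v]
  | some lca => pvCycleU parent fuel u lca ++ (pvTempV parent fuel v lca).reverse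

-- ===== PORT B =====
-- 'while x is not None: pos[x] = len(chemin_u); chemin_u.append(x); x = parent.get(x)'
def pvBuildU (parent : List (Int × Int × Option (Int × Int))) :
    Nat → Option (Int × Int) → List (Int × Int) → PySem.Dict (Int × Int) Int →
    List (Int × Int) × PySem.Dict (Int × Int) Int
  | _, none, acc, pos => (acc, pos)
  | 0, some _, acc, pos => (acc, pos)
  | n+1, some x, acc, pos =>
      pvBuildU parent n (pvGet parent x) (acc ++ [x]) (pos.insert x (acc.length : Int))

-- 'while y is not None and y not in pos: coll.append(y); y = parent.get(y)'
def pvWalkV (parent : List (Int × Int × Option (Int × Int))) (pos : PySem.Dict (Int × Int) Int) :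
    Nat → Option (Int × Int) → List (Int × Int) → Option (Int × Int) × List (Int × Int)
  | _, none, coll => (none, coll)
  | 0, some y, coll => (some y, coll)
  | n+1, some y, coll =>
      if pos.contains y then (some y, coll)
      else pvWalkV parent pos n (pvGet parent y) (coll ++ [y])

def reconstruire_cycle_alt (u : Int × Int) (v : Int × Int) (parent : List (Int × Int × Option (Int × Int))) : List (Int × Int) :=
  let fuel := parent.length + 1
  let bu := pvBuildU parent fuel (some u) [] PySem.Dict.empty
  match pvWalkV parent bu.2 fuel (some v) [] with
  | (none, _) => [u, v]
  | (some l, coll) =>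
      -- 'i = pos[l]' (key present by the loop guard); 'chemin_u[:i+1] + coll[::-1]'
      PySem.List.slice bu.1 none (some (bu.2.getD l 0 + 1)) ++ coll.reverse

-- ===== PRECONDITION & SPEC =====
-- pvChain parent n x = the ancestor chain of x in the parent MAP (a property of the input dict, not of
-- either port): x, parent[x], parent[parent[x]], ... — some chain iff it reaches a root within n steps.
def pvChain (parent : List (Int × Int × Option (Int × Int))) : Nat → (Int × Int) → Option (List (Int × Int))
  | 0, _ => none
  | n+1, x => match pvGet parent x with
    | none => some [x]
    | some p => (pvChain parent n p).map (x :: ·)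

-- Pre_ = the ancestor chains of u and of v in the parent map are acyclic (reach a root). On the excluded
-- inputs the Python A (and B) loops forever and returns nothing, so no value is claimed there. Acyclicity
-- of pointer chains has no quantifier-free form, so it is stated via pvChain, a declarative description of
-- the input dict's ancestor chain; len(parent)+1 steps always suffice for an acyclic chain, so nothing
-- terminating is excluded.
def Pre_reconstruire_cycle (u : Int × Int) (v : Int × Int) (parent : List (Int × Int × Option (Int × Int))) : Prop :=
  (pvChain parent (parent.length + 1) u).isSome = true ∧
  (pvChain parent (parent.length + 1) v).isSome = true

instance (u : Int × Int) (v : Int × Int) (parent : List (Int × Int × Option (Int × Int))) : Decidable (Pre_reconstruire_cycle u v parent) := by unfold Pre_reconstruire_cycle; infer_instance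

def pvWitness_reconstruire_cycle : (Int × Int) × (Int × Int) × (List (Int × Int × Option (Int × Int))) :=
  ((0, 0), (1, 1), [(1, 1, some (2, 2)), (2, 2, some (0, 0)), (0, 0, none)])

def Spec_reconstruire_cycle (u : Int × Int) (v : Int × Int) (parent : List (Int × Int × Option (Int × Int))) (out : List (Int × Int)) : Prop := out = reconstruire_cycle_alt u v parent
instance (u : Int × Int) (v : Int × Int) (parent : List (Int × Int × Option (Int × Int))) (out : List (Int × Int)) : Decidable (Spec_reconstruire_cycle u v parent out) := by unfold Spec_reconstruire_cycle; infer_instance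

-- ===== CLAIM (what is proved, stated in full; the proofs are below) =====
def Claim_equal_reconstruire_cycle : Prop := ∀ (u : Int × Int) (v : Int × Int) (parent : List (Int × Int × Option (Int × Int))), Dom_reconstruire_cycle u v parent → Pre_reconstruire_cycle u v parent → Spec_reconstruire_cycle u v parent (reconstruire_cycle u v parent)

-- ===== LEMMAS AND PROOFS =====

-- step lemmas for the fuelled loops
theorem pvChain_succ_none (parent : List (Int × Int × Option (Int × Int))) {x : Int × Int}
    (hg : pvGet parent x = none) (n : Nat) : pvChain parent (n+1) x = some [x] := by
  rw [pvChain, hg]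

theorem pvChain_succ_some (parent : List (Int × Int × Option (Int × Int))) {x p : Int × Int}
    (hg : pvGet parent x = some p) (n : Nat) :
    pvChain parent (n+1) x = (pvChain parent n p).map (x :: ·) := by
  rw [pvChain, hg]

theorem pvChain_cons (parent : List (Int × Int × Option (Int × Int)))
    {k : Nat} {x p : Int × Int} {L : List (Int × Int)}
    (h : pvChain parent (k+1) x = some L) (hg : pvGet parent x = some p) :
    ∃ rest, pvChain parent k p = some rest ∧ L = x :: rest := by
  rw [pvChain_succ_some parent hg] at h
  cases hc : pvChain parent k p with
  | none => rw [hc] at h; simp at h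
  | some rest => rw [hc] at h; exact ⟨rest, rfl, by simpa using h.symm⟩

theorem pvChain_mono (parent : List (Int × Int × Option (Int × Int))) :
    ∀ {n m : Nat} {x : Int × Int} {L : List (Int × Int)},
    pvChain parent n x = some L → n ≤ m → pvChain parent m x = some L := by
  intro n
  induction n with
  | zero => intro m x L h _; simp [pvChain] at h
  | succ k ih =>
    intro m x L h hle
    obtain ⟨m', rfl⟩ : ∃ m', m = m' + 1 := ⟨m - 1, by omega⟩
    cases hg : pvGet parent x with
    | none =>
      rw [pvChain_succ_none parent hg] at h ⊢
      exact h
    | some p =>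
      obtain ⟨rest, hrest, rfl⟩ := pvChain_cons parent h hg
      rw [pvChain_succ_some parent hg, ih hrest (by omega)]
      rfl

theorem pvChain_head (parent : List (Int × Int × Option (Int × Int))) :
    ∀ {n : Nat} {x : Int × Int} {L : List (Int × Int)},
    pvChain parent n x = some L → ∃ t, L = x :: t := by
  intro n x L h
  cases n with
  | zero => simp [pvChain] at h
  | succ k =>
    cases hg : pvGet parent x with
    | none =>
      rw [pvChain_succ_none parent hg] at h
      exact ⟨[], by simpa using h.symm⟩
    | some p =>
      obtain ⟨rest, -, rfl⟩ := pvChain_cons parent h hg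
      exact ⟨rest, rfl⟩

theorem pvChain_suffix (parent : List (Int × Int × Option (Int × Int))) :
    ∀ {n : Nat} {x z : Int × Int} {L : List (Int × Int)},
    pvChain parent n x = some L → z ∈ L →
    ∃ L', pvChain parent n z = some L' ∧ L' <:+ L := by
  intro n
  induction n with
  | zero => intro x z L h _; simp [pvChain] at h
  | succ k ih =>
    intro x z L h hz
    cases hg : pvGet parent x with
    | none =>
      rw [pvChain_succ_none parent hg] at h
      obtain rfl : L = [x] := by simpa using h.symm
      simp at hz; subst hz
      exact ⟨[z], pvChain_succ_none parent hg k, List.suffix_refl _⟩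
    | some p =>
      obtain ⟨rest, hrest, rfl⟩ := pvChain_cons parent h hg
      rcases List.mem_cons.mp hz with rfl | hz'
      · refine ⟨z :: rest, ?_, List.suffix_refl _⟩
        rw [pvChain_succ_some parent hg, hrest]
        rfl
      · obtain ⟨L', hL', hs⟩ := ih hrest hz'
        exact ⟨L', pvChain_mono parent hL' (Nat.le_succ k), hs.trans (List.suffix_cons x rest)⟩

theorem pvChain_functional (parent : List (Int × Int × Option (Int × Int)))
    {n m : Nat} {x : Int × Int} {L L' : List (Int × Int)}
    (h1 : pvChain parent n x = some L) (h2 : pvChain parent m x = some L') : L = L' := by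
  rcases Nat.le_total n m with h | h
  · rw [pvChain_mono parent h1 h] at h2; exact Option.some.inj h2
  · rw [pvChain_mono parent h2 h] at h1; exact (Option.some.inj h1).symm

theorem pvChain_nodup (parent : List (Int × Int × Option (Int × Int))) :
    ∀ {n : Nat} {x : Int × Int} {L : List (Int × Int)},
    pvChain parent n x = some L → L.Nodup := by
  intro n
  induction n with
  | zero => intro x L h; simp [pvChain] at h
  | succ k ih =>
    intro x L h
    cases hg : pvGet parent x with
    | none =>
      rw [pvChain_succ_none parent hg] at h
      obtain rfl : L = [x] := by simpa using h.symm
      simp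
    | some p =>
      obtain ⟨rest, hrest, rfl⟩ := pvChain_cons parent h hg
      refine List.nodup_cons.mpr ⟨?_, ih hrest⟩
      intro hx
      obtain ⟨L', hL', hs⟩ := pvChain_suffix parent hrest hx
      have heq : L' = x :: rest := pvChain_functional parent (pvChain_mono parent hL' (Nat.le_succ k)) h
      subst heq
      have := hs.length_le
      simp at this

theorem pvClimb_eq (parent : List (Int × Int × Option (Int × Int))) :
    ∀ {n : Nat} {x : Int × Int} {L : List (Int × Int)},
    pvChain parent n x = some L → pvClimb parent n x = L := by
  intro n
  induction n with
  | zero => intro x L h; simp [pvChain] at h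
  | succ k ih =>
    intro x L h
    cases hg : pvGet parent x with
    | none =>
      rw [pvChain_succ_none parent hg] at h
      obtain rfl : L = [x] := by simpa using h.symm
      rw [pvClimb, hg]
    | some p =>
      obtain ⟨rest, hrest, rfl⟩ := pvChain_cons parent h hg
      rw [pvClimb, hg]
      show x :: pvClimb parent k p = x :: rest
      rw [ih hrest]

theorem pvCycleU_eq (parent : List (Int × Int × Option (Int × Int))) :
    ∀ {n : Nat} {x l : Int × Int} {L : List (Int × Int)},
    pvChain parent n x = some L → l ∈ L →
    pvCycleU parent n x l = L.take (L.idxOf l + 1) := by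
  intro n
  induction n with
  | zero => intro x l L h _; simp [pvChain] at h
  | succ k ih =>
    intro x l L h hl
    by_cases hxl : x = l
    · subst hxl
      obtain ⟨t, rfl⟩ := pvChain_head parent h
      rw [pvCycleU, if_pos rfl, List.idxOf_cons_self]
      simp
    · cases hg : pvGet parent x with
      | none =>
        rw [pvChain_succ_none parent hg] at h
        obtain rfl : L = [x] := by simpa using h.symm
        simp at hl; exact absurd hl.symm hxl
      | some p =>
        obtain ⟨rest, hrest, rfl⟩ := pvChain_cons parent h hg
        have hl' : l ∈ rest := by
          rcases List.mem_cons.mp hl with rfl | h'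
          · exact absurd rfl hxl
          · exact h'
        rw [pvCycleU, if_neg hxl, hg]
        show x :: pvCycleU parent k p l = _
        rw [ih hrest hl', List.idxOf_cons_ne _ hxl]
        rfl

theorem pvTempV_eq (parent : List (Int × Int × Option (Int × Int))) :
    ∀ {n : Nat} {y l : Int × Int} {L : List (Int × Int)},
    pvChain parent n y = some L → l ∈ L →
    pvTempV parent n y l = L.take (L.idxOf l) := by
  intro n
  induction n with
  | zero => intro y l L h _; simp [pvChain] at h
  | succ k ih =>
    intro y l L h hl
    by_cases hyl : y = l
    · subst hyl
      obtain ⟨t, rfl⟩ := pvChain_head parent h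
      rw [pvTempV, if_pos rfl, List.idxOf_cons_self]
      rfl
    · cases hg : pvGet parent y with
      | none =>
        rw [pvChain_succ_none parent hg] at h
        obtain rfl : L = [y] := by simpa using h.symm
        simp at hl; exact absurd hl.symm hyl
      | some p =>
        obtain ⟨rest, hrest, rfl⟩ := pvChain_cons parent h hg
        have hl' : l ∈ rest := by
          rcases List.mem_cons.mp hl with rfl | h'
          · exact absurd rfl hyl
          · exact h'
        rw [pvTempV, if_neg hyl, hg]
        show y :: pvTempV parent k p l = _
        rw [ih hrest hl', List.idxOf_cons_ne _ hyl]
        rfl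

theorem pvBuildU_nil (parent : List (Int × Int × Option (Int × Int)))
    (n : Nat) (acc : List (Int × Int)) (pos : PySem.Dict (Int × Int) Int) :
    pvBuildU parent n none acc pos = (acc, pos) := by
  cases n <;> rfl

theorem pvBuildU_succ (parent : List (Int × Int × Option (Int × Int)))
    (n : Nat) (x : Int × Int) (acc : List (Int × Int)) (pos : PySem.Dict (Int × Int) Int) :
    pvBuildU parent (n+1) (some x) acc pos =
      pvBuildU parent n (pvGet parent x) (acc ++ [x]) (pos.insert x (acc.length : Int)) := rfl

theorem pvBuildU_fst (parent : List (Int × Int × Option (Int × Int))) :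
    ∀ {n : Nat} {x : Int × Int} {L : List (Int × Int)},
    pvChain parent n x = some L →
    ∀ (acc : List (Int × Int)) (pos : PySem.Dict (Int × Int) Int),
    (pvBuildU parent n (some x) acc pos).1 = acc ++ L := by
  intro n
  induction n with
  | zero => intro x L h; simp [pvChain] at h
  | succ k ih =>
    intro x L h acc pos
    cases hg : pvGet parent x with
    | none =>
      rw [pvChain_succ_none parent hg] at h
      obtain rfl : L = [x] := by simpa using h.symm
      rw [pvBuildU_succ, hg, pvBuildU_nil]
    | some p =>
      obtain ⟨rest, hrest, rfl⟩ := pvChain_cons parent h hg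
      rw [pvBuildU_succ, hg, ih hrest]
      simp

theorem pvBuildU_get? (parent : List (Int × Int × Option (Int × Int))) :
    ∀ {n : Nat} {x : Int × Int} {L : List (Int × Int)},
    pvChain parent n x = some L → L.Nodup →
    ∀ (acc : List (Int × Int)) (pos : PySem.Dict (Int × Int) Int) (z : Int × Int),
    (pvBuildU parent n (some x) acc pos).2.get? z =
      if z ∈ L then some ((acc.length + L.idxOf z : Nat) : Int) else pos.get? z := by
  intro n
  induction n with
  | zero => intro x L h; simp [pvChain] at h
  | succ k ih =>
    intro x L h hnd acc pos z
    cases hg : pvGet parent x with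
    | none =>
      rw [pvChain_succ_none parent hg] at h
      obtain rfl : L = [x] := by simpa using h.symm
      rw [pvBuildU_succ, hg, pvBuildU_nil]
      by_cases hz : z = x
      · subst hz
        simp [List.idxOf_cons_self]
      · simp [PySem.Dict.get?_insert, hz]
    | some p =>
      obtain ⟨rest, hrest, rfl⟩ := pvChain_cons parent h hg
      have hxrest : x ∉ rest := (List.nodup_cons.mp hnd).1
      rw [pvBuildU_succ, hg, ih hrest (List.nodup_cons.mp hnd).2]
      by_cases hz : z ∈ rest
      · have hzx : z ≠ x := fun he => hxrest (he ▸ hz)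
        rw [if_pos hz, if_pos (show z ∈ x :: rest by simp [hz]),
            List.idxOf_cons_ne _ (fun he => hzx he.symm)]
        congr 1
        simp [List.length_append]
        omega
      · rw [if_neg hz]
        by_cases hzx : z = x
        · subst hzx
          simp [List.idxOf_cons_self]
        · rw [if_neg (by simp [hzx, hz])]
          simp [PySem.Dict.get?_insert, hzx]

theorem pvWalkV_nil (parent : List (Int × Int × Option (Int × Int)))
    (pos : PySem.Dict (Int × Int) Int) (n : Nat) (coll : List (Int × Int)) :
    pvWalkV parent pos n none coll = (none, coll) := by
  cases n <;> rfl

theorem pvWalkV_succ_pos (parent : List (Int × Int × Option (Int × Int)))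
    {pos : PySem.Dict (Int × Int) Int} {y : Int × Int} (hp : pos.contains y = true)
    (n : Nat) (coll : List (Int × Int)) :
    pvWalkV parent pos (n+1) (some y) coll = (some y, coll) := by
  rw [pvWalkV, if_pos hp]

theorem pvWalkV_succ_neg (parent : List (Int × Int × Option (Int × Int)))
    {pos : PySem.Dict (Int × Int) Int} {y : Int × Int} (hp : pos.contains y = false)
    (n : Nat) (coll : List (Int × Int)) :
    pvWalkV parent pos (n+1) (some y) coll =
      pvWalkV parent pos n (pvGet parent y) (coll ++ [y]) := by
  rw [pvWalkV, if_neg (by simp [hp])]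

theorem pvWalkV_spec (parent : List (Int × Int × Option (Int × Int)))
    (pos : PySem.Dict (Int × Int) Int) :
    ∀ {n : Nat} {y : Int × Int} {L : List (Int × Int)},
    pvChain parent n y = some L →
    ∀ (coll : List (Int × Int)),
    pvWalkV parent pos n (some y) coll =
      match L.find? (fun z => pos.contains z) with
      | none => (none, coll ++ L)
      | some l => (some l, coll ++ L.takeWhile (fun z => !pos.contains z)) := by
  intro n
  induction n with
  | zero => intro y L h; simp [pvChain] at h
  | succ k ih =>
    intro y L h coll
    cases hp : pos.contains y with
    | true =>
      obtain ⟨t, rfl⟩ := pvChain_head parent h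
      rw [pvWalkV_succ_pos parent hp, List.find?_cons_of_pos hp]
      simp [hp]
    | false =>
      rw [pvWalkV_succ_neg parent hp]
      cases hg : pvGet parent y with
      | none =>
        rw [pvChain_succ_none parent hg] at h
        obtain rfl : L = [y] := by simpa using h.symm
        rw [pvWalkV_nil, List.find?_cons_of_neg (by simp [hp])]
        simp
      | some p =>
        obtain ⟨rest, hrest, rfl⟩ := pvChain_cons parent h hg
        rw [ih hrest, List.find?_cons_of_neg (by simp [hp])]
        cases hf : rest.find? (fun z => pos.contains z) with
        | none => simp
        | some l => simp [hp]

-- the prefix before the first p-element is the prefix before the first occurrence of that element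
theorem takeWhile_eq_take_of_find? {p : (Int × Int) → Bool} :
    ∀ {L : List (Int × Int)} {l : Int × Int},
    L.find? p = some l → L.takeWhile (fun z => !p z) = L.take (L.idxOf l) := by
  intro L
  induction L with
  | nil => intro l h; simp at h
  | cons a t ih =>
    intro l h
    cases hp : p a with
    | true =>
      rw [List.find?_cons_of_pos hp] at h
      obtain rfl : a = l := by simpa using h
      rw [List.idxOf_cons_self]
      simp [hp]
    | false =>
      rw [List.find?_cons_of_neg (by simp [hp])] at h
      have hla : a ≠ l := by
        intro he; subst he
        rw [List.find?_some h] at hp; simp at hp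
      rw [List.idxOf_cons_ne _ hla]
      simp only [List.takeWhile_cons, hp]
      rw [ih h]
      rfl

-- a Nodup list splits at an element in exactly one way
theorem nodup_split_unique {α : Type} :
    ∀ {a : List α} {L b c d : List α} {x : α}, L.Nodup →
    L = a ++ x :: b → L = c ++ x :: d → a = c ∧ b = d := by
  intro a
  induction a with
  | nil =>
    intro L b c d x hnd h1 h2
    subst h1
    cases c with
    | nil =>
      simp only [List.nil_append] at h2
      exact ⟨rfl, (List.cons.inj h2).2⟩
    | cons y c' =>
      exfalso
      simp only [List.nil_append, List.cons_append] at h2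
      obtain ⟨hyx, h2⟩ := List.cons.inj h2
      have hnb := (List.nodup_cons.mp hnd).1
      rw [h2] at hnb
      exact hnb (by simp)
  | cons y a' ih =>
    intro L b c d x hnd h1 h2
    subst h1
    cases c with
    | nil =>
      exfalso
      simp only [List.nil_append, List.cons_append] at h2
      obtain ⟨hxy, h2⟩ := List.cons.inj h2
      have hnb := (List.nodup_cons.mp hnd).1
      rw [hxy] at hnb
      exact hnb (by simp)
    | cons y' c' =>
      simp only [List.cons_append] at h2
      obtain ⟨hyy, h2⟩ := List.cons.inj h2
      obtain ⟨ha, hb⟩ := ih (List.nodup_cons.mp hnd).2 rfl h2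
      exact ⟨by rw [hyy, ha], hb⟩

-- the first node of u's chain lying on v's chain is also the first node of v's chain lying on u's chain
theorem pvFind_comm (parent : List (Int × Int × Option (Int × Int)))
    {n : Nat} {u v l : Int × Int} {LU LV : List (Int × Int)}
    (hU : pvChain parent n u = some LU) (hV : pvChain parent n v = some LV)
    (h1 : LU.find? (fun z => decide (z ∈ LV)) = some l) :
    LV.find? (fun z => decide (z ∈ LU)) = some l := by
  have hlU : l ∈ LU := List.mem_of_find?_eq_some h1
  have hlV : l ∈ LV := by have := List.find?_some h1; simpa using this
  have hsome : (LV.find? (fun z => decide (z ∈ LU))).isSome := by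
    rw [List.find?_isSome]
    exact ⟨l, hlV, by simpa using hlU⟩
  obtain ⟨l', h2⟩ := Option.isSome_iff_exists.mp hsome
  have hl'V : l' ∈ LV := List.mem_of_find?_eq_some h2
  have hl'U : l' ∈ LU := by have := List.find?_some h2; simpa using this
  obtain ⟨-, U1, U2, hUdec, hU1⟩ := List.find?_eq_some_iff_append.mp h1
  obtain ⟨-, V1, V2, hVdec, hV1⟩ := List.find?_eq_some_iff_append.mp h2
  obtain ⟨CA, hCA, hCAsufU⟩ := pvChain_suffix parent hU hlU
  obtain ⟨CB, hCB, hCBsufV⟩ := pvChain_suffix parent hV hl'V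
  obtain ⟨tA, hCAhead⟩ := pvChain_head parent hCA
  obtain ⟨tB, hCBhead⟩ := pvChain_head parent hCB
  obtain ⟨WA, hWA⟩ := hCAsufU
  obtain ⟨WB, hWB⟩ := hCBsufV
  have hUdec2 : LU = WA ++ l :: tA := by rw [← hWA, hCAhead]
  have hVdec2 : LV = WB ++ l' :: tB := by rw [← hWB, hCBhead]
  have hCAeq : CA = l :: U2 := by
    rw [hCAhead, (nodup_split_unique (pvChain_nodup parent hU) hUdec2 hUdec).2]
  have hCBeq : CB = l' :: V2 := by
    rw [hCBhead, (nodup_split_unique (pvChain_nodup parent hV) hVdec2 hVdec).2]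
  have hl'CA : l' ∈ CA := by
    rw [hCAeq]
    have hnot : l' ∉ U1 := fun hm => by simpa [hl'V] using hU1 l' hm
    rcases List.mem_append.mp (hUdec ▸ hl'U) with hmem | hmem
    · exact absurd hmem hnot
    · exact hmem
  have hlCB : l ∈ CB := by
    rw [hCBeq]
    have hnot : l ∉ V1 := fun hm => by simpa [hlU] using hV1 l hm
    rcases List.mem_append.mp (hVdec ▸ hlV) with hmem | hmem
    · exact absurd hmem hnot
    · exact hmem
  obtain ⟨CB2, hCB2, hsuf1⟩ := pvChain_suffix parent hCA hl'CA
  rw [pvChain_functional parent hCB2 hCB] at hsuf1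
  obtain ⟨CA2, hCA2, hsuf2⟩ := pvChain_suffix parent hCB hlCB
  rw [pvChain_functional parent hCA2 hCA] at hsuf2
  have hCACB : CA = CB := by
    obtain ⟨W, hW⟩ := hsuf2
    have hWnil : W = [] := by
      have hlen1 := hsuf1.length_le
      have hlen2 := congrArg List.length hW
      simp at hlen2
      cases W with
      | nil => rfl
      | cons w W' => exfalso; simp at hlen2; omega
    rw [hWnil] at hW
    simpa using hW
  have hll' : l = l' := by
    rw [hCAhead, hCBhead] at hCACB
    exact (List.cons.inj hCACB).1
  rw [h2, hll']

-- ===== VERDICT (by name: the statement is the Claim_ definition above) =====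
theorem reconstruire_cycle_spec : Claim_equal_reconstruire_cycle := by
  intro u v parent _dom hpre
  obtain ⟨hu, hv⟩ := hpre
  obtain ⟨LU, hLU⟩ := Option.isSome_iff_exists.mp hu
  obtain ⟨LV, hLV⟩ := Option.isSome_iff_exists.mp hv
  have hndU := pvChain_nodup parent hLU
  have hget := pvBuildU_get? parent hLU hndU [] PySem.Dict.empty
  have hfst := pvBuildU_fst parent hLU [] PySem.Dict.empty
  have hpA : ∀ z : Int × Int,
      PySem.Set.contains (PySem.Set.ofList LV) z = decide (z ∈ LV) := by
    intro z
    by_cases hz : z ∈ LV <;> simp [pysem, hz]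
  have hpB : ∀ z : Int × Int,
      (pvBuildU parent (parent.length + 1) (some u) [] PySem.Dict.empty).2.contains z
        = decide (z ∈ LU) := by
    intro z
    rw [PySem.Dict.contains_eq_isSome_get?, hget z]
    by_cases hz : z ∈ LU <;> simp [hz, PySem.Dict.get?_empty]
  show reconstruire_cycle u v parent = reconstruire_cycle_alt u v parent
  simp only [reconstruire_cycle, reconstruire_cycle_alt]
  rw [pvClimb_eq parent hLU, pvClimb_eq parent hLV,
      pvWalkV_spec parent _ hLV []]
  simp only [hpA, hpB]
  cases hf : LU.find? (fun z => decide (z ∈ LV)) with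
  | none =>
    have hf2 : LV.find? (fun z => decide (z ∈ LU)) = none := by
      rw [List.find?_eq_none] at hf ⊢
      intro y hy hdec
      exact hf y (by simpa using hdec) (by simpa using hy)
    rw [hf2]
  | some l =>
    have hf2 : LV.find? (fun z => decide (z ∈ LU)) = some l :=
      pvFind_comm parent hLU hLV hf
    rw [hf2]
    have hlU : l ∈ LU := List.mem_of_find?_eq_some hf
    have hlV : l ∈ LV := by have := List.find?_some hf; simpa using this
    dsimp only
    rw [pvCycleU_eq parent hLU hlU, pvTempV_eq parent hLV hlV,
        takeWhile_eq_take_of_find? hf2,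
        PySem.Dict.getD_eq_get?_getD, hget l, if_pos hlU, hfst]
    simp only [List.nil_append, List.length_nil, Nat.zero_add, Option.getD_some]
    have hcast : ((LU.idxOf l : Nat) : Int) + 1 = ((LU.idxOf l + 1 : Nat) : Int) := by
      push_cast; ring
    rw [hcast, PySem.List.slice_to_natCast]
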